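-- pv_equiv track=rewrite | github.com/Mithzzx/CP-Solution-Vault | Leetcode/Biweekly Contest 167/3708. Longest Fibonacci Subarray.py | longestFibonacciSubarray
-- ===== SOURCE A (Python) =====
-- def longestFibonacciSubarray(nums):
--     n = len(nums)
--     if n <= 2:
--         return n
--     # Store the input midway in the function
--     valtoremin = nums
--     max_len = 2
--     curr_len = 2
--     for i in range(2, n):
--         if nums[i] == nums[i-1] + nums[i-2]:
--             curr_len += 1
--         else:
--             curr_len = 2
--         max_len = max(max_len, curr_len)
--     return max_len
-- ===== SOURCE B (Python) =====
-- def longestFibonacciSubarray(nums):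
--     n = len(nums)
--     if n <= 2:
--         return n
--     # pass 1: table of which positions satisfy the Fibonacci condition
--     ok = [nums[i] == nums[i-1] + nums[i-2] for i in range(2, n)]
--     # pass 2: the longest run of True equals the largest gap between
--     # consecutive "break" positions (False indices, with sentinels)
--     breaks = [-1] + [j for j, b in enumerate(ok) if not b] + [len(ok)]
--     best = 0
--     for b1, b2 in zip(breaks, breaks[1:]):
--         gap = b2 - b1 - 1
--         if gap > best:
--             best = gap
--     return 2 + best
-- ===== Notes on version B (the rewrite author's own statement) =====
-- stated objective: alternative
-- what changed: A fuses matching and streak-tracking into one loop with a running curr_len/max_len pair; B first builds a boolean match table, then computes the longest True run as the largest gap between consecutive break (False) positions collected with enumerate, using zip over the sentinel-padded break list.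
import Mathlib
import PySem

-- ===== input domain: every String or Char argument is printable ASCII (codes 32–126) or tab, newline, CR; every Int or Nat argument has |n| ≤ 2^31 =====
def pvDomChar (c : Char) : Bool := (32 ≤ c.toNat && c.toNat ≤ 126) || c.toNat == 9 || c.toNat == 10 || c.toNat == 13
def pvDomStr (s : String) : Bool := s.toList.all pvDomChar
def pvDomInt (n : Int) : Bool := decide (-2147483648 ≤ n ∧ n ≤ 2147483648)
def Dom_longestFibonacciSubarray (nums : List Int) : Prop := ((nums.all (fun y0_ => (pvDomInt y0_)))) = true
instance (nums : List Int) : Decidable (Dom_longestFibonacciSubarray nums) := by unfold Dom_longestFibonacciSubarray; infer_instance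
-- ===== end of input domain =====

-- B replaces A's fused match-and-streak counter by a match table plus a
-- largest-gap-between-breaks pass; same O(n) cost (objective: alternative).

-- ===== PORT A =====
def longestFibonacciSubarray (nums : List Int) : Int :=
  let n : Int := (nums.length : Int)
  if n ≤ 2 then n
  else
    let st := (PySem.List.pyRange 2 n 1).foldl
      (fun (st : Int × Int) (i : Int) =>
        let curr : Int :=
          if PySem.List.pyGetD nums i 0 =
              PySem.List.pyGetD nums (i-1) 0 + PySem.List.pyGetD nums (i-2) 0
          then st.2 + 1 else 2
        (max st.1 curr, curr))
      (2, 2)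
    st.1

-- ===== PORT B =====
def longestFibonacciSubarray_alt (nums : List Int) : Int :=
  let n : Int := (nums.length : Int)
  if n ≤ 2 then n
  else
    let ok : List Bool := (PySem.List.pyRange 2 n 1).map
      (fun (i : Int) => decide (PySem.List.pyGetD nums i 0 =
        PySem.List.pyGetD nums (i-1) 0 + PySem.List.pyGetD nums (i-2) 0))
    let breaks : List Int :=
      [-1] ++ ((PySem.List.enumerate ok 0).filter (fun p => !p.2)).map (·.1)
        ++ [(ok.length : Int)]
    -- breaks[1:]
    let best : Int := (breaks.zip (PySem.List.slice breaks (some 1) none)).foldl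
      (fun (best : Int) (p : Int × Int) =>
        let gap := p.2 - p.1 - 1
        if gap > best then gap else best) 0
    2 + best

-- ===== PRECONDITION & SPEC =====
def Spec_longestFibonacciSubarray (nums : List Int) (out : Int) : Prop := out = longestFibonacciSubarray_alt nums
instance (nums : List Int) (out : Int) : Decidable (Spec_longestFibonacciSubarray nums out) := by unfold Spec_longestFibonacciSubarray; infer_instance

-- ===== CLAIM (what is proved, stated in full; the proofs are below) =====
def Claim_equal_longestFibonacciSubarray : Prop := ∀ (nums : List Int), Dom_longestFibonacciSubarray nums → Spec_longestFibonacciSubarray nums (longestFibonacciSubarray nums)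

-- ===== LEMMAS AND PROOFS =====

-- length of the leading run of `true`
def pvLead : List Bool → Int
  | [] => 0
  | b :: t => if b then 1 + pvLead t else 0

-- length of the longest run of `true`
def pvMr : List Bool → Int
  | [] => 0
  | b :: t => if b then max (1 + pvLead t) (pvMr t) else pvMr t

-- indices of the `false` entries
def pvFI : List Bool → List Int
  | [] => []
  | b :: t => if b then (pvFI t).map (· + 1) else 0 :: (pvFI t).map (· + 1)

-- running max of gaps between consecutive entries (prev = previous entry)
def pvMG (prev best : Int) : List Int → Int
  | [] => best
  | x :: xs => pvMG x (if x - prev - 1 > best then x - prev - 1 else best) xs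

theorem pvLead_nonneg (l : List Bool) : 0 ≤ pvLead l := by
  induction l with
  | nil => simp [pvLead]
  | cons b t ih => simp only [pvLead]; split <;> omega

theorem pvLead_le_pvMr (l : List Bool) : pvLead l ≤ pvMr l ∧ 0 ≤ pvMr l := by
  induction l with
  | nil => simp [pvLead, pvMr]
  | cons b t ih => simp only [pvLead, pvMr]; split <;> omega

-- A-side invariant: the fused fold computes max of start state and runs
theorem pvAfold (l : List Bool) : ∀ m c : Int, 2 ≤ c → c ≤ m →
    (l.foldl (fun (st : Int × Int) (b : Bool) =>
      let curr : Int := if b then st.2 + 1 else 2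
      (max st.1 curr, curr)) (m, c)).1
    = max m (max (c + pvLead l) (2 + pvMr l)) := by
  induction l with
  | nil => intro m c h1 h2; simp [pvLead, pvMr]; omega
  | cons b t ih =>
    intro m c h1 h2
    have hl := pvLead_nonneg t
    have hm := pvLead_le_pvMr t
    cases b with
    | true =>
      simp only [List.foldl_cons, if_true, pvLead, pvMr]
      rw [ih (max m (c + 1)) (c + 1) (by omega) (by omega)]
      omega
    | false =>
      simp only [List.foldl_cons, Bool.false_eq_true, if_false, pvLead, pvMr]
      rw [ih (max m 2) 2 (by omega) (by omega)]
      omega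

-- B-side: the enumerate/filter comprehension computes the false indices
theorem pvFI_enum (l : List Bool) : ∀ s : Int,
    ((PySem.List.enumerate l s).filter (fun p => !p.2)).map (·.1)
      = (pvFI l).map (· + s) := by
  induction l with
  | nil => intro s; simp [PySem.List.enumerate_nil, pvFI]
  | cons b t ih =>
    intro s
    cases b with
    | true =>
      have hf : ((PySem.List.enumerate (true :: t) s).filter (fun p => !p.2))
          = (PySem.List.enumerate t (s + 1)).filter (fun p => !p.2) := by
        simp [PySem.List.enumerate_cons]
      rw [hf, ih (s + 1)]
      simp only [pvFI, if_true, List.map_map]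
      refine List.map_congr_left fun x _ => ?_
      simp; omega
    | false =>
      have hf : ((PySem.List.enumerate (false :: t) s).filter (fun p => !p.2))
          = (s, false) :: (PySem.List.enumerate t (s + 1)).filter (fun p => !p.2) := by
        simp [PySem.List.enumerate_cons]
      rw [hf]
      simp only [List.map_cons, ih (s + 1)]
      simp only [pvFI, Bool.false_eq_true, if_false, List.map_cons, List.map_map]
      rw [show (0 : Int) + s = s by omega]
      refine congrArg (s :: ·) (List.map_congr_left fun x _ => ?_)
      simp; omega

-- the zip-with-tail fold is the adjacent-gap recursion
theorem pvZipFold (xs : List Int) : ∀ x best : Int,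
    (((x :: xs).zip xs).foldl
      (fun (best : Int) (p : Int × Int) =>
        let gap := p.2 - p.1 - 1
        if gap > best then gap else best) best)
    = pvMG x best xs := by
  induction xs with
  | nil => intro x best; simp [pvMG]
  | cons y ys ih => intro x best; simpa [pvMG] using ih y _

-- shifting every entry and prev by 1 preserves the gaps
theorem pvMG_shift (l : List Int) : ∀ prev best : Int,
    pvMG prev best (l.map (· + 1)) = pvMG (prev - 1) best l := by
  induction l with
  | nil => intro prev best; simp [pvMG]
  | cons x xs ih =>
    intro prev best
    simp only [List.map_cons, pvMG]
    rw [ih]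
    have : x + 1 - prev - 1 = x - (prev - 1) - 1 := by omega
    rw [this]
    congr 1
    omega

-- main B-side lemma: max gap over false indices + sentinels = longest run
theorem pvMG_spec (l : List Bool) : ∀ prev best : Int, prev ≤ -1 →
    pvMG prev best (pvFI l ++ [(l.length : Int)])
      = max best (max (pvLead l + (-1 - prev)) (pvMr l)) := by
  induction l with
  | nil =>
    intro prev best h
    simp only [pvFI, List.nil_append, List.length_nil, Int.natCast_zero, pvMG, pvLead, pvMr]
    omega
  | cons b t ih =>
    intro prev best h
    have hm := pvLead_le_pvMr t
    have hcast : (((b :: t).length : Nat) : Int) = ((t.length : Int)) + 1 := by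
      simp
    cases b with
    | true =>
      simp only [pvFI, if_true, pvLead, pvMr, hcast]
      have hlist : (pvFI t).map (· + 1) ++ [((t.length : Int)) + 1]
          = (pvFI t ++ [(t.length : Int)]).map (· + 1) := by
        simp
      rw [hlist, pvMG_shift, ih (prev - 1) best (by omega)]
      omega
    | false =>
      simp only [pvFI, Bool.false_eq_true, if_false, pvLead, pvMr, hcast]
      have hlist : (0 : Int) :: ((pvFI t).map (· + 1) ++ [((t.length : Int)) + 1])
          = 0 :: (pvFI t ++ [(t.length : Int)]).map (· + 1) := by
        simp
      rw [List.cons_append, hlist]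
      show pvMG 0 _ _ = _
      rw [pvMG_shift, ih (0 - 1) _ (by omega)]
      omega

-- ===== VERDICT (by name: the statement is the Claim_ definition above) =====
theorem longestFibonacciSubarray_spec : Claim_equal_longestFibonacciSubarray := by
  intro nums _
  unfold Spec_longestFibonacciSubarray longestFibonacciSubarray longestFibonacciSubarray_alt
  by_cases h : ((nums.length : Int)) ≤ 2
  · simp [h]
  · simp only [h, if_false]
    set okL : List Bool := (PySem.List.pyRange 2 (nums.length : Int) 1).map
      (fun (i : Int) => decide (PySem.List.pyGetD nums i 0 =
        PySem.List.pyGetD nums (i-1) 0 + PySem.List.pyGetD nums (i-2) 0)) with hok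
    -- A side: fold over the range = fold over the boolean table
    have hA : ((PySem.List.pyRange 2 (nums.length : Int) 1).foldl
        (fun (st : Int × Int) (i : Int) =>
          let curr : Int :=
            if PySem.List.pyGetD nums i 0 =
                PySem.List.pyGetD nums (i-1) 0 + PySem.List.pyGetD nums (i-2) 0
            then st.2 + 1 else 2
          (max st.1 curr, curr)) (2, 2)).1
        = (okL.foldl (fun (st : Int × Int) (b : Bool) =>
            let curr : Int := if b then st.2 + 1 else 2
            (max st.1 curr, curr)) (2, 2)).1 := by
      rw [hok, List.foldl_map]
      simp only [decide_eq_true_eq]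
    rw [hA, pvAfold okL 2 2 (by omega) (by omega)]
    -- B side
    rw [PySem.List.slice_from_one]
    have hbreaks : [-1] ++ ((PySem.List.enumerate okL 0).filter (fun p => !p.2)).map (·.1)
        ++ [(okL.length : Int)]
        = (-1) :: (pvFI okL ++ [(okL.length : Int)]) := by
      rw [pvFI_enum okL 0]
      simp
    rw [hbreaks]
    simp only [List.tail_cons]
    rw [pvZipFold, pvMG_spec okL (-1) 0 (by omega)]
    have hm := pvLead_le_pvMr okL
    omega
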